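-- pv_equiv track=rewrite | github.com/adityanjr/code-DS-ALGO | Binarysearch.io problems/Arrays/List Min Replacement/List Min Replacement.py | solve
-- ===== SOURCE A (Python) =====
-- def solve(nums):
--   if(nums):
--     minsofar=nums[0]
--     nums[0]=0
--     for i in range(1,len(nums)):
--         currentElement=nums[i]
--         nums[i]=minsofar
--         minsofar=min(minsofar,currentElement)
--     return(nums)
--
--   else:
--       return(nums)
-- ===== SOURCE B (Python) =====
-- def solve(nums):
--     orig = nums[:]
--     nums[:] = [min(orig[:i]) if i > 0 else 0 for i in range(len(orig))]
--     return nums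
-- ===== Notes on version B (the rewrite author's own statement) =====
-- stated objective: alternative
-- what changed: B snapshots the input and rebuilds each position i directly as min(orig[:i]) (0 for i=0) by re-scanning the prefix slice every time, a nested-pass definition-style computation instead of A's single in-place sweep threading a running-min scalar.
import Mathlib
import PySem

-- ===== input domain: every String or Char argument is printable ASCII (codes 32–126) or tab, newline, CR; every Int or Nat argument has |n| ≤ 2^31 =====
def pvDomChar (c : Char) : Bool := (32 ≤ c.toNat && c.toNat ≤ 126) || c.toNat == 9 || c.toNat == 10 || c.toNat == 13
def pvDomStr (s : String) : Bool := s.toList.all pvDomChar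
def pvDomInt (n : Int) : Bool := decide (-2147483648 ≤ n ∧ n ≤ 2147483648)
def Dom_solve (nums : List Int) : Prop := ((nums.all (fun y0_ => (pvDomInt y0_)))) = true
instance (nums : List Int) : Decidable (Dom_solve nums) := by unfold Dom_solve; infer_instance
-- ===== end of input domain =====

-- B rebuilds each position i directly as min(orig[:i]) by re-scanning the prefix slice (nested
-- passes), instead of A's single in-place sweep threading a running-min scalar; both mutate the
-- argument in place in Python — the equivalence proved here is about the return value.

-- ===== PORT A =====
def solve (nums : List Int) : List Int :=
  if nums ≠ [] then
    let minsofar := PySem.List.pyGetD nums 0 0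
    let nums0 := nums.set 0 0
    let st := (PySem.List.pyRange 1 (nums0.length : Int) 1).foldl
      (fun (st : List Int × Int) i =>
        let currentElement := PySem.List.pyGetD st.1 i 0
        (st.1.set i.toNat st.2, min st.2 currentElement)) (nums0, minsofar)
    st.1
  else nums

-- ===== PORT B =====
-- min(orig[:i]) is taken on a slice that is nonempty whenever the branch fires (0 < i),
-- so the .getD 0 default of min? is never used.
def solve_alt (nums : List Int) : List Int :=
  let orig := nums
  (PySem.List.pyRange 0 (orig.length : Int) 1).map
    (fun i => if 0 < i then (PySem.List.min? (PySem.List.slice orig none (some i)) (fun y => y)).getD 0 else 0)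

-- ===== PRECONDITION & SPEC =====
def Spec_solve (nums : List Int) (out : List Int) : Prop := out = solve_alt nums
instance (nums : List Int) (out : List Int) : Decidable (Spec_solve nums out) := by unfold Spec_solve; infer_instance

-- ===== CLAIM =====
def Claim_equal_solve : Prop := ∀ (nums : List Int), Dom_solve nums → Spec_solve nums (solve nums)

-- ===== LEMMAS AND PROOFS =====

/-- The shifted running-min list both programs ultimately produce past position 0. -/
def shiftpm : List Int → Int → List Int
  | [], _ => []
  | x :: xs, m => m :: shiftpm xs (min m x)

theorem shiftpm_eq_map (t : List Int) : ∀ m : Int,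
    shiftpm t m = (List.range t.length).map (fun j => (t.take j).foldl min m) := by
  induction t with
  | nil => intro m; simp [shiftpm]
  | cons x xs ih =>
    intro m
    simp only [shiftpm, List.length_cons, List.range_succ_eq_map, List.map_cons, List.map_map]
    simp [ih (min m x), Function.comp, List.foldl_cons]

theorem solve_loop (t : List Int) : ∀ (pre : List Int) (m : Int),
    ((PySem.List.pyRange (pre.length : Int) ((pre ++ t).length : Int) 1).foldl
      (fun (st : List Int × Int) i =>
        (st.1.set i.toNat st.2, min st.2 (PySem.List.pyGetD st.1 i 0))) (pre ++ t, m)).1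
      = pre ++ shiftpm t m := by
  induction t with
  | nil =>
    intro pre m
    rw [PySem.List.pyRange_one]
    simp [shiftpm]
  | cons x xs ih =>
    intro pre m
    rw [PySem.List.pyRange_one_cons (by simp)]
    rw [List.foldl_cons]
    have hset : (pre ++ x :: xs).set (Int.toNat (pre.length : Int)) m = (pre ++ [m]) ++ xs := by
      simp
    have hget : PySem.List.pyGetD (pre ++ x :: xs) (pre.length : Int) 0 = x := by
      rw [PySem.List.pyGetD_natCast]
      simp [List.getD]
    simp only [hset, hget]
    have hlen : ((pre.length : Int) + 1) = (((pre ++ [m]).length : Int)) := by simp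
    have hlen2 : (((pre ++ x :: xs).length : Int)) = (((pre ++ [m]) ++ xs).length : Int) := by simp
    rw [hlen, hlen2, ih (pre ++ [m]) (min m x)]
    simp [shiftpm]

theorem solve_cons (a : Int) (t : List Int) : solve (a :: t) = 0 :: shiftpm t a := by
  have h0 : PySem.List.pyGetD (a :: t) 0 0 = a := by simp [PySem.List.pyGetD]
  show (_ : List Int × Int).1 = _
  rw [show ((a :: t).set 0 0) = [(0:Int)] ++ t from rfl]
  rw [h0]
  rw [show (1 : Int) = (([(0:Int)].length : Int)) from rfl]
  exact solve_loop t [0] a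

theorem solve_alt_cons (a : Int) (t : List Int) :
    solve_alt (a :: t) = 0 :: shiftpm t a := by
  show (PySem.List.pyRange 0 (((a :: t).length : Int)) 1).map _ = _
  rw [PySem.List.pyRange_one]
  simp only [List.length_cons, Int.sub_zero, Int.toNat_natCast, List.range_succ_eq_map,
    List.map_cons, List.map_map]
  rw [shiftpm_eq_map]
  congr 1
  apply List.map_congr_left
  intro j _
  simp only [Function.comp, Nat.succ_eq_add_one, Int.zero_add]
  rw [PySem.List.slice_to_natCast]
  rw [if_pos (by positivity)]
  have ht : (a :: t).take (j + 1) = a :: t.take j := by simp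
  rw [ht, PySem.List.min?_id_cons]
  simp

-- ===== VERDICT =====
theorem solve_spec : Claim_equal_solve := by
  intro nums _
  unfold Spec_solve
  cases nums with
  | nil => rfl
  | cons a t => rw [solve_cons, solve_alt_cons]
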